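-- pv_equiv track=rewrite | github.com/ender-s/Image-Encoder-Decoder | Decoder.py | detect_different_color_intensity_values
-- ===== SOURCE A (Python) =====
-- def detect_different_color_intensity_values(matrix):
--     n = len(matrix)
--     m = len(matrix[0])
--     # n x m matrix
--
--     color_intensity_values = []
--
--     for i in range(n): # row loop
--         for j in range(m): # column loop
--             pixel = matrix[i][j]
--             for k in range(len(pixel)):
--                 color_intensity_value = pixel[k]
--                 if not color_intensity_value in color_intensity_values:
--                     color_intensity_values.append(color_intensity_value)
--
--     color_intensity_values.sort()
--     return color_intensity_values
-- ===== SOURCE B (Python) =====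
-- def detect_different_color_intensity_values(matrix):
--     n = len(matrix)
--     m = len(matrix[0])
--     # flatten: every channel value of the first m columns of each row
--     flat = []
--     for i in range(n):
--         row = matrix[i]
--         for j in range(m):
--             flat.extend(row[j])
--     flat.sort()
--     # one linear pass: keep each value only when it differs from the last kept one
--     result = []
--     for v in flat:
--         if not result or v != result[-1]:
--             result.append(v)
--     return result
-- ===== Notes on version B (the rewrite author's own statement) =====
-- stated objective: faster
-- what changed: Replaces A's per-value membership scan of the growing distinct list (then sort) with flatten-once, sort-once, and a single adjacent-difference dedup pass over the sorted list.
import Mathlib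
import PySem

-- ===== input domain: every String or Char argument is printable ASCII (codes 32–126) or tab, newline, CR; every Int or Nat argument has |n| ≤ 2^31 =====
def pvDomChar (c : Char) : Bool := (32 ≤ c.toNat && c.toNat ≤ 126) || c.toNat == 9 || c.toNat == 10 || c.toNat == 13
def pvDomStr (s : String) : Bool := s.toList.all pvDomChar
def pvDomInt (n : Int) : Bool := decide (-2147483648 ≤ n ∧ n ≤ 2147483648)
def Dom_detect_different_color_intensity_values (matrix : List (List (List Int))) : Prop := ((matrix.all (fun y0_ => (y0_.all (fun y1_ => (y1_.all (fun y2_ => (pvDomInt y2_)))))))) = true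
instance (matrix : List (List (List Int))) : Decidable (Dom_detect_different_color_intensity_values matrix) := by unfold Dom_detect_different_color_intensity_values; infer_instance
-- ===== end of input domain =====

-- B flattens all channel values, sorts once, and deduplicates adjacent equals in one pass,
-- instead of A's membership scan of the growing distinct list; return values agree on Pre_.

-- ===== PORT A =====
def detect_different_color_intensity_values (matrix : List (List (List Int))) : List Int :=
  let n : Int := matrix.length
  -- matrix[0] raises IndexError on an empty matrix: excluded by Pre_; pyGetD's default is junk there
  let m : Int := ((PySem.List.pyGetD matrix 0 []).length : Int)
  let vals : List Int :=
    (PySem.List.pyRange 0 n 1).foldl (fun acc i =>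
      (PySem.List.pyRange 0 m 1).foldl (fun acc j =>
        let pixel := PySem.List.pyGetD (PySem.List.pyGetD matrix i []) j []
        (PySem.List.pyRange 0 (pixel.length : Int) 1).foldl (fun acc k =>
          let v := PySem.List.pyGetD pixel k 0
          if v ∈ acc then acc else acc ++ [v]) acc) acc) []
  PySem.List.sorted vals (fun x => x) false

-- ===== PORT B =====
def detect_different_color_intensity_values_alt (matrix : List (List (List Int))) : List Int :=
  let n : Int := matrix.length
  let m : Int := ((PySem.List.pyGetD matrix 0 []).length : Int)
  let flat : List Int :=
    (PySem.List.pyRange 0 n 1).foldl (fun acc i =>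
      let row := PySem.List.pyGetD matrix i []
      (PySem.List.pyRange 0 m 1).foldl (fun acc j => acc ++ PySem.List.pyGetD row j []) acc) []
  let sortedFlat := PySem.List.sorted flat (fun x => x) false
  sortedFlat.foldl (fun result v =>
    if result = [] ∨ v ≠ PySem.List.pyGetD result (-1) 0 then result ++ [v] else result) []

-- ===== PRECONDITION & SPEC =====
-- Pre_ excludes exactly the inputs where A raises IndexError: the empty matrix (matrix[0])
-- and matrices with a row shorter than the first row (matrix[i][j] with j < m).
def Pre_detect_different_color_intensity_values (matrix : List (List (List Int))) : Prop :=
  matrix ≠ [] ∧ ∀ row ∈ matrix, (matrix.headD []).length ≤ row.length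
instance (matrix : List (List (List Int))) : Decidable (Pre_detect_different_color_intensity_values matrix) := by unfold Pre_detect_different_color_intensity_values; infer_instance
def pvWitness_detect_different_color_intensity_values : List (List (List Int)) := [[[2, 1], [1, 3]], [[3], [0, 2]]]
def Spec_detect_different_color_intensity_values (matrix : List (List (List Int))) (out : List Int) : Prop := out = detect_different_color_intensity_values_alt matrix
instance (matrix : List (List (List Int))) (out : List Int) : Decidable (Spec_detect_different_color_intensity_values matrix out) := by unfold Spec_detect_different_color_intensity_values; infer_instance

-- ===== CLAIM (what is proved, stated in full; the proofs are below) =====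
def Claim_equal_detect_different_color_intensity_values : Prop := ∀ (matrix : List (List (List Int))), Dom_detect_different_color_intensity_values matrix → Pre_detect_different_color_intensity_values matrix → Spec_detect_different_color_intensity_values matrix (detect_different_color_intensity_values matrix)

-- ===== LEMMAS AND PROOFS =====

-- A's accumulation step; B's dedup step
def pvStep (acc : List Int) (v : Int) : List Int := if v ∈ acc then acc else acc ++ [v]
def pvDStep (result : List Int) (v : Int) : List Int :=
  if result = [] ∨ v ≠ PySem.List.pyGetD result (-1) 0 then result ++ [v] else result

-- a fold of an inner fold is a fold over the flatMap
theorem pv_foldl_foldl_flatMap {α β γ : Type} (g : α → List γ) (f : β → γ → β) :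
    ∀ (xs : List α) (init : β),
      xs.foldl (fun a x => (g x).foldl f a) init = (xs.flatMap g).foldl f init := by
  intro xs
  induction xs with
  | nil => intro init; simp
  | cons x xs ih => intro init; simp [List.foldl_append, ih]

-- a j-loop 'for j in range(m): … row[j] …' with m ≤ len row is a fold over row.take m
theorem pv_foldl_pyRange_take {α β : Type} [Inhabited α] (row : List α) (m : Nat)
    (hm : m ≤ row.length) (d : α) (g : β → α → β) (init : β) :
    (PySem.List.pyRange 0 (m : Int) 1).foldl (fun a j => g a (PySem.List.pyGetD row j d)) init
      = (row.take m).foldl g init := by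
  have hcongr : (PySem.List.pyRange 0 (m : Int) 1).foldl
      (fun a j => g a (PySem.List.pyGetD row j d)) init
      = (PySem.List.pyRange 0 (m : Int) 1).foldl
      (fun a j => g a (PySem.List.pyGetD (row.take m) j d)) init := by
    apply PySem.List.foldl_congr_mem
    intro a j hj
    rw [PySem.List.mem_pyRange_one] at hj
    rw [PySem.List.pyGetD_eq_getElem row d hj.1 (by omega),
        PySem.List.pyGetD_eq_getElem (row.take m) d hj.1 (by simp only [List.length_take]; omega)]
    simp [List.getElem_take]
  have hlen : ((row.take m).length : Int) = (m : Int) := by simp; omega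
  rw [hcongr, ← hlen, PySem.List.foldl_pyRange_zero_pyGetD']

-- fold of per-element folds over a list of lists is a fold over the concatenation
theorem pv_foldl_foldl_id {β γ : Type} (f : β → γ → β) :
    ∀ (xs : List (List γ)) (init : β),
      xs.foldl (List.foldl f) init = (xs.flatMap id).foldl f init := by
  intro xs
  induction xs with
  | nil => intro init; simp
  | cons x xs ih => intro init; simp [List.foldl_append, ih]

-- invariant of A's distinct-collection fold
theorem pv_collect_inv : ∀ (L acc : List Int), acc.Nodup →
    (L.foldl pvStep acc).Nodup ∧ ∀ x, x ∈ L.foldl pvStep acc ↔ x ∈ acc ∨ x ∈ L := by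
  intro L
  induction L with
  | nil => intro acc h; simp [h]
  | cons v L ih =>
    intro acc hacc
    by_cases hv : v ∈ acc
    · have := ih acc hacc
      simp only [List.foldl_cons, pvStep, if_pos hv]
      refine ⟨this.1, fun x => ?_⟩
      rw [(this.2 x)]
      constructor
      · rintro (h | h) <;> simp [h]
      · rintro (h | h)
        · exact Or.inl h
        · rcases List.mem_cons.mp h with h | h
          · exact Or.inl (h ▸ hv)
          · exact Or.inr h
    · have hnd : (acc ++ [v]).Nodup := by
        rw [List.nodup_append]
        refine ⟨hacc, List.nodup_singleton _, ?_⟩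
        intro a ha b hb h
        rw [List.mem_singleton] at hb
        exact hv (hb ▸ h ▸ ha)
      have := ih (acc ++ [v]) hnd
      simp only [List.foldl_cons, pvStep, if_neg hv]
      refine ⟨this.1, fun x => ?_⟩
      rw [(this.2 x)]
      simp [or_assoc, or_comm, or_left_comm]

-- every element of a strictly increasing list is at most its last element
theorem pv_le_getLast (out : List Int) (h : out.Pairwise (· < ·)) (hne : out ≠ []) :
    ∀ a ∈ out, a ≤ out.getLast hne := by
  intro a ha
  obtain ⟨i, hi, rfl⟩ := List.mem_iff_getElem.mp ha
  rw [List.getLast_eq_getElem]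
  rcases Nat.lt_or_ge i (out.length - 1) with h' | h'
  · exact le_of_lt ((List.pairwise_iff_getElem.mp h) i (out.length - 1) hi (by omega) h')
  · have : i = out.length - 1 := by omega
    simp [this]

-- invariant of B's adjacent-dedup fold over a sorted list
theorem pv_dedup_inv : ∀ (S out : List Int), S.Pairwise (· ≤ ·) → out.Pairwise (· < ·) →
    (∀ a ∈ out, ∀ b ∈ S, a ≤ b) →
    (S.foldl pvDStep out).Pairwise (· < ·) ∧
      ∀ x, x ∈ S.foldl pvDStep out ↔ x ∈ out ∨ x ∈ S := by
  intro S
  induction S with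
  | nil => intro out _ hout _; simp [hout]
  | cons v S ih =>
    intro out hS hout hle
    have hSp : S.Pairwise (· ≤ ·) := hS.tail
    have hvS : ∀ b ∈ S, v ≤ b := fun b hb => List.rel_of_pairwise_cons hS hb
    simp only [List.foldl_cons]
    by_cases hc : out = [] ∨ v ≠ PySem.List.pyGetD out (-1) 0
    · -- v is appended
      have hout' : (out ++ [v]).Pairwise (· < ·) := by
        rw [List.pairwise_append]
        refine ⟨hout, List.pairwise_singleton _ _, ?_⟩
        intro a ha b hb
        rw [List.mem_singleton] at hb
        rw [hb]
        have hav : a ≤ v := hle a ha v (List.mem_cons_self ..)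
        have hne : out ≠ [] := by rintro rfl; simp at ha
        rcases hc with hc | hc
        · exact absurd hc hne
        · rw [PySem.List.pyGetD_neg_one out 0 hne] at hc
          rcases lt_or_eq_of_le hav with hlt | heq
          · exact hlt
          · exfalso
            have h1 : out.getLast hne ≤ v :=
              hle _ (List.getLast_mem hne) v (List.mem_cons_self ..)
            have h2 : a ≤ out.getLast hne := pv_le_getLast out hout hne a ha
            exact hc (le_antisymm h1 (heq ▸ h2)).symm
      have hle' : ∀ a ∈ out ++ [v], ∀ b ∈ S, a ≤ b := by
        intro a ha b hb
        rcases List.mem_append.mp ha with h | h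
        · exact hle a h b (List.mem_cons_of_mem _ hb)
        · rw [List.mem_singleton] at h; exact h ▸ hvS b hb
      have := ih (out ++ [v]) hSp hout' hle'
      rw [pvDStep, if_pos hc]
      refine ⟨this.1, fun x => ?_⟩
      rw [this.2 x]; simp [or_assoc, or_comm, or_left_comm]
    · -- v is skipped: v equals the last kept value, hence v ∈ out already
      push Not at hc
      obtain ⟨hne, hveq⟩ := hc
      have hvmem : v ∈ out := by
        rw [PySem.List.pyGetD_neg_one out 0 hne] at hveq
        exact hveq ▸ List.getLast_mem hne
      have hle' : ∀ a ∈ out, ∀ b ∈ S, a ≤ b :=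
        fun a ha b hb => hle a ha b (List.mem_cons_of_mem _ hb)
      have := ih out hSp hout hle'
      rw [pvDStep, if_neg (by push Not; exact ⟨hne, hveq⟩)]
      refine ⟨this.1, fun x => ?_⟩
      rw [this.2 x]
      constructor
      · rintro (h | h) <;> simp [h]
      · rintro (h | h)
        · exact Or.inl h
        · rcases List.mem_cons.mp h with h | h
          · exact Or.inl (h ▸ hvmem)
          · exact Or.inr h

-- ===== VERDICT (by name: the statement is the Claim_ definition above) =====
theorem detect_different_color_intensity_values_spec : Claim_equal_detect_different_color_intensity_values := by
  intro matrix _ hpre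
  obtain ⟨hne, hrows⟩ := hpre
  unfold Spec_detect_different_color_intensity_values
  unfold detect_different_color_intensity_values detect_different_color_intensity_values_alt
  simp only []
  set m : Nat := (PySem.List.pyGetD matrix 0 []).length with hm
  -- reduce both index loops to structural folds over the truncated rows
  set L : List Int := matrix.flatMap (fun row => (row.take m).flatMap id) with hL
  have hmrow : ∀ row ∈ matrix, m ≤ row.length := by
    intro row hr
    have : PySem.List.pyGetD matrix 0 [] = matrix.headD [] := by
      cases matrix with
      | nil => simp at hne
      | cons a t => simp [PySem.List.pyGetD_zero]
    rw [hm, this]; exact hrows row hr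
  -- A's collected list equals L.foldl pvStep []
  have hA : (PySem.List.pyRange 0 (matrix.length : Int) 1).foldl (fun acc i =>
      (PySem.List.pyRange 0 (m : Int) 1).foldl (fun acc j =>
        let pixel := PySem.List.pyGetD (PySem.List.pyGetD matrix i []) j []
        (PySem.List.pyRange 0 (pixel.length : Int) 1).foldl (fun acc k =>
          let v := PySem.List.pyGetD pixel k 0
          if v ∈ acc then acc else acc ++ [v]) acc) acc) []
      = L.foldl pvStep [] := by
    rw [PySem.List.foldl_pyRange_zero_pyGetD' matrix [] (fun acc row =>
      (PySem.List.pyRange 0 (m : Int) 1).foldl (fun acc j =>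
        let pixel := PySem.List.pyGetD row j []
        (PySem.List.pyRange 0 (pixel.length : Int) 1).foldl (fun acc k =>
          let v := PySem.List.pyGetD pixel k 0
          if v ∈ acc then acc else acc ++ [v]) acc) acc) []]
    have hrow : ∀ acc (row : List (List Int)), row ∈ matrix →
        (PySem.List.pyRange 0 (m : Int) 1).foldl (fun acc j =>
          let pixel := PySem.List.pyGetD row j []
          (PySem.List.pyRange 0 (pixel.length : Int) 1).foldl (fun acc k =>
            let v := PySem.List.pyGetD pixel k 0
            if v ∈ acc then acc else acc ++ [v]) acc) acc
        = ((row.take m).flatMap id).foldl pvStep acc := by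
      intro acc row hr
      rw [pv_foldl_pyRange_take row m (hmrow row hr) [] (fun acc pixel =>
        (PySem.List.pyRange 0 (pixel.length : Int) 1).foldl (fun acc k =>
          let v := PySem.List.pyGetD pixel k 0
          if v ∈ acc then acc else acc ++ [v]) acc) acc]
      have hpix : ∀ acc (pixel : List Int),
          (PySem.List.pyRange 0 (pixel.length : Int) 1).foldl (fun acc k =>
            let v := PySem.List.pyGetD pixel k 0
            if v ∈ acc then acc else acc ++ [v]) acc
          = pixel.foldl pvStep acc := by
        intro acc pixel
        exact PySem.List.foldl_pyRange_zero_pyGetD' pixel 0 pvStep acc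
      rw [PySem.List.foldl_congr_mem _ _ _ _ (fun a x _ => hpix a x),
          pv_foldl_foldl_id pvStep]
    rw [PySem.List.foldl_congr_mem _ _ _ _ (fun a row hr => hrow a row hr),
        pv_foldl_foldl_flatMap (fun row : List (List Int) => (row.take m).flatMap id) pvStep, hL]
  -- B's flat list equals L
  have hB : (PySem.List.pyRange 0 (matrix.length : Int) 1).foldl (fun acc i =>
      let row := PySem.List.pyGetD matrix i []
      (PySem.List.pyRange 0 (m : Int) 1).foldl
        (fun acc j => acc ++ PySem.List.pyGetD row j []) acc) []
      = L := by
    rw [PySem.List.foldl_pyRange_zero_pyGetD' matrix [] (fun acc row =>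
      (PySem.List.pyRange 0 (m : Int) 1).foldl
        (fun acc j => acc ++ PySem.List.pyGetD row j []) acc) []]
    have hrow : ∀ acc (row : List (List Int)), row ∈ matrix →
        (PySem.List.pyRange 0 (m : Int) 1).foldl
          (fun acc j => acc ++ PySem.List.pyGetD row j []) acc
        = acc ++ (row.take m).flatMap id := by
      intro acc row hr
      rw [pv_foldl_pyRange_take row m (hmrow row hr) [] (fun acc pixel => acc ++ pixel) acc,
          PySem.List.foldl_append_eq_flatMap]
      rfl
    rw [PySem.List.foldl_congr_mem _ _ _ _ (fun a row hr => hrow a row hr),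
        PySem.List.foldl_append_eq_flatMap, List.nil_append, hL]

  -- now the core fact
  rw [hA, hB]
  set C := L.foldl pvStep [] with hC
  set S := PySem.List.sorted L (fun x => x) false with hS
  have hcol := pv_collect_inv L [] (by simp)
  have hSord : S.Pairwise (fun a b => (fun x : Int => x) a ≤ (fun x : Int => x) b) :=
    PySem.List.sorted_pairwise L (fun x => x)
  have hded := pv_dedup_inv S [] (by simpa using hSord) (by simp) (by simp)
  have hDmem : ∀ x, x ∈ S.foldl pvDStep [] ↔ x ∈ L := by
    intro x; rw [hded.2 x]; simp [hS, PySem.List.mem_sorted]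
  have hDnd : (S.foldl pvDStep []).Nodup := (hded.1).imp ne_of_lt
  have hperm : (S.foldl pvDStep []).Perm C := by
    rw [List.perm_ext_iff_of_nodup hDnd hcol.1]
    intro x; rw [hDmem x, hcol.2 x]; simp
  have := PySem.List.sorted_eq_of_perm_of_pairwise_lt (key := fun x : Int => x)
    (xs := C) (ys := S.foldl pvDStep []) hperm (hded.1)
  rw [this]
  -- align pvStep/pvDStep with the inlined lambdas
  rfl
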